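-- pv_equiv track=rewrite | github.com/BernardoAbreu/Terminator_Sublime | terminator.py | find_adjacente_panels
-- ===== SOURCE A (Python) =====
-- def find_adjacente_panels(cells,active):
--     act_col_min,act_row_min,act_col_max,act_row_max = active
--
--     #Find left and right
--     left = []
--     right = []
--     above = []
--     below = []
--     for i,(col_min,row_min,col_max,row_max) in enumerate(cells):
--         if row_min >= act_row_min and row_max <= act_row_max:
--             if col_max == act_col_min:
--                 left.append(i)
--             elif col_min == act_col_max:
--                 right.append(i)
--
--         if col_min >= act_col_min and col_max <= act_col_max:
--             if row_max == act_row_min: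
--                 above.append(i)
--             elif row_min == act_row_max:
--                 below.append(i)
--
--     return [left,above,right,below]
-- ===== SOURCE B (Python) =====
-- def find_adjacente_panels(cells, active):
--     act_col_min, act_row_min, act_col_max, act_row_max = active
--     indexed = list(enumerate(cells))
--     left = [i for i, (cmin, rmin, cmax, rmax) in indexed
--             if rmin >= act_row_min and rmax <= act_row_max and cmax == act_col_min]
--     above = [i for i, (cmin, rmin, cmax, rmax) in indexed
--              if cmin >= act_col_min and cmax <= act_col_max and rmax == act_row_min]
--     right = [i for i, (cmin, rmin, cmax, rmax) in indexed
--              if rmin >= act_row_min and rmax <= act_row_max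
--              and cmax != act_col_min and cmin == act_col_max]
--     below = [i for i, (cmin, rmin, cmax, rmax) in indexed
--              if cmin >= act_col_min and cmax <= act_col_max
--              and rmax != act_row_min and rmin == act_row_max]
--     return [left, above, right, below]
-- ===== Notes on version B (the rewrite author's own statement) =====
-- stated objective: alternative
-- what changed: Replaces the single stateful loop that appends into four accumulator lists with four independent list comprehensions over enumerate(cells), one per output list, with the elif exclusions made explicit as != conjuncts.
import Mathlib
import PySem

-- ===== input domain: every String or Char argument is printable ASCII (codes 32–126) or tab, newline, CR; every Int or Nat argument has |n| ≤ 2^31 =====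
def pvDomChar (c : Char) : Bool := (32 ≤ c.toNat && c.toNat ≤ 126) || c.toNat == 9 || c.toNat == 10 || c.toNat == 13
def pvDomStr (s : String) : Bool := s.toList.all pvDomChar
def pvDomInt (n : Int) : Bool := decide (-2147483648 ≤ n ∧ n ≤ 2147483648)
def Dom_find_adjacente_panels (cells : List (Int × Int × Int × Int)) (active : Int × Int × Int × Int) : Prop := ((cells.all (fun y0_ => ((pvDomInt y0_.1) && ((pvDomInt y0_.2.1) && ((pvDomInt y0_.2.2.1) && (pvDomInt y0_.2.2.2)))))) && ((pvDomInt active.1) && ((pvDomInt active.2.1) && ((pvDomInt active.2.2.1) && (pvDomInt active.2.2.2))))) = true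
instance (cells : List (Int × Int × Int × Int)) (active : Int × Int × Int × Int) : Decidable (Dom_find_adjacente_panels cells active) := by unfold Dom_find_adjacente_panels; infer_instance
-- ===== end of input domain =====

-- B replaces A's single stateful loop (four accumulators, elif chains) by four independent
-- comprehension-style filters over the indexed cell list; same cost, different decomposition.

-- ===== PORT A =====
-- one loop step of A: state is (i, left, above, right, below)
def stepA (ac0 ar0 ac1 ar1 : Int)
    (s : Int × List Int × List Int × List Int × List Int)
    (cell : Int × Int × Int × Int) : Int × List Int × List Int × List Int × List Int :=
  match s, cell with
  | (i, left, above, right, below), (cmin, rmin, cmax, rmax) =>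
    let lr : List Int × List Int :=
      if rmin ≥ ar0 ∧ rmax ≤ ar1 then
        if cmax = ac0 then (left ++ [i], right)
        else if cmin = ac1 then (left, right ++ [i])
        else (left, right)
      else (left, right)
    let ab : List Int × List Int :=
      if cmin ≥ ac0 ∧ cmax ≤ ac1 then
        if rmax = ar0 then (above ++ [i], below)
        else if rmin = ar1 then (above, below ++ [i])
        else (above, below)
      else (above, below)
    (i + 1, lr.1, ab.1, lr.2, ab.2)

def find_adjacente_panels (cells : List (Int × Int × Int × Int)) (active : Int × Int × Int × Int) : List (List Int) :=
  match active with
  | (ac0, ar0, ac1, ar1) =>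
    let st := cells.foldl (stepA ac0 ar0 ac1 ar1) (0, [], [], [], [])
    [st.2.1, st.2.2.1, st.2.2.2.1, st.2.2.2.2]

-- ===== PORT B =====
-- enumerate(cells): pair each cell with its (Python int) index
def pvIdx (i : Int) : List (Int × Int × Int × Int) → List (Int × Int × Int × Int × Int)
  | [] => []
  | x :: xs => (i, x) :: pvIdx (i + 1) xs

-- the four comprehension conditions of Source B (p = (i, cmin, rmin, cmax, rmax))
def condL (ac0 ar0 _ac1 ar1 : Int) (p : Int × Int × Int × Int × Int) : Bool :=
  decide (p.2.2.1 ≥ ar0) && decide (p.2.2.2.2 ≤ ar1) && decide (p.2.2.2.1 = ac0)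
def condA (ac0 ar0 ac1 _ar1 : Int) (p : Int × Int × Int × Int × Int) : Bool :=
  decide (p.2.1 ≥ ac0) && decide (p.2.2.2.1 ≤ ac1) && decide (p.2.2.2.2 = ar0)
def condR (ac0 ar0 ac1 ar1 : Int) (p : Int × Int × Int × Int × Int) : Bool :=
  decide (p.2.2.1 ≥ ar0) && decide (p.2.2.2.2 ≤ ar1) && !decide (p.2.2.2.1 = ac0) && decide (p.2.1 = ac1)
def condB (ac0 ar0 ac1 ar1 : Int) (p : Int × Int × Int × Int × Int) : Bool :=
  decide (p.2.1 ≥ ac0) && decide (p.2.2.2.1 ≤ ac1) && !decide (p.2.2.2.2 = ar0) && decide (p.2.2.1 = ar1)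

def find_adjacente_panels_alt (cells : List (Int × Int × Int × Int)) (active : Int × Int × Int × Int) : List (List Int) :=
  match active with
  | (ac0, ar0, ac1, ar1) =>
    let e := pvIdx 0 cells
    [ (e.filter (condL ac0 ar0 ac1 ar1)).map Prod.fst,
      (e.filter (condA ac0 ar0 ac1 ar1)).map Prod.fst,
      (e.filter (condR ac0 ar0 ac1 ar1)).map Prod.fst,
      (e.filter (condB ac0 ar0 ac1 ar1)).map Prod.fst ]

-- ===== PRECONDITION & SPEC =====
def Spec_find_adjacente_panels (cells : List (Int × Int × Int × Int)) (active : Int × Int × Int × Int) (out : List (List Int)) : Prop := out = find_adjacente_panels_alt cells active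
instance (cells : List (Int × Int × Int × Int)) (active : Int × Int × Int × Int) (out : List (List Int)) : Decidable (Spec_find_adjacente_panels cells active out) := by unfold Spec_find_adjacente_panels; infer_instance

-- ===== CLAIM (what is proved, stated in full; the proofs are below) =====
def Claim_equal_find_adjacente_panels : Prop := ∀ (cells : List (Int × Int × Int × Int)) (active : Int × Int × Int × Int), Dom_find_adjacente_panels cells active → Spec_find_adjacente_panels cells active (find_adjacente_panels cells active)

-- ===== LEMMAS AND PROOFS =====
set_option maxHeartbeats 1000000 in
theorem loop_eq (ac0 ar0 ac1 ar1 : Int) :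
    ∀ (cells : List (Int × Int × Int × Int)) (i : Int) (L A R B : List Int),
    List.foldl (stepA ac0 ar0 ac1 ar1) (i, L, A, R, B) cells =
      (i + cells.length,
       L ++ ((pvIdx i cells).filter (condL ac0 ar0 ac1 ar1)).map Prod.fst,
       A ++ ((pvIdx i cells).filter (condA ac0 ar0 ac1 ar1)).map Prod.fst,
       R ++ ((pvIdx i cells).filter (condR ac0 ar0 ac1 ar1)).map Prod.fst,
       B ++ ((pvIdx i cells).filter (condB ac0 ar0 ac1 ar1)).map Prod.fst) := by
  intro cells
  induction cells with
  | nil => intro i L A R B; simp [pvIdx]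
  | cons hd tl ih =>
    intro i L A R B
    obtain ⟨cmin, rmin, cmax, rmax⟩ := hd
    simp only [List.foldl_cons, stepA, pvIdx]
    rw [ih]; clear ih
    simp only [List.filter_cons, condL, condA, condR, condB, List.length_cons]
    split_ifs with h1 h2 h3 h4 h5 h6 <;>
      simp only [Bool.and_eq_true, Bool.not_eq_true', decide_eq_true_eq,
        decide_eq_false_iff_not, ge_iff_le] at * <;>
      first
        | omega
        | (simp [List.append_assoc]; try omega)

theorem find_adjacente_panels_spec : Claim_equal_find_adjacente_panels := by
  intro cells active _
  obtain ⟨ac0, ar0, ac1, ar1⟩ := active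
  show find_adjacente_panels cells (ac0, ar0, ac1, ar1)
      = find_adjacente_panels_alt cells (ac0, ar0, ac1, ar1)
  simp [find_adjacente_panels, find_adjacente_panels_alt, loop_eq]
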